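-- pv_equiv track=rewrite | github.com/shanksms/python_epi | strings/rearrange_sentences.py | rearrangeTheSentence
-- ===== SOURCE A (Python) =====
-- import operator
--
-- def rearrangeTheSentence(sentence):
--     sentence = sentence.strip(".")
--     words = sentence.split()
--     lengths = [len(word) for word in words]
--
--     pairs = list(zip(lengths, words))
--     pairs.sort(key=operator.itemgetter(0))
--     new_sentence = []
--     for i, j in pairs:
--         new_sentence.append(j)
--     new_sentence = " ".join(new_sentence)\
--         .lower()
--     new_sentence = new_sentence[0].upper() + new_sentence[1:] + "."
--     return new_sentence
-- ===== SOURCE B (Python) =====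
-- def rearrangeTheSentence(sentence):
--     words = sentence.strip(".").split()
--     longest = max(len(w) for w in words)
--     ordered = []
--     for length in range(longest + 1):
--         for w in words:
--             if len(w) == length:
--                 ordered.append(w)
--     s = " ".join(ordered).lower()
--     return s[0].upper() + s[1:] + "."
-- ===== Notes on version B (the rewrite author's own statement) =====
-- stated objective: alternative
-- what changed: Replaced the zip-lengths-then-comparison-sort of (length, word) pairs by a counting/bucket pass: for each length from 0 to the longest, append the words of that length in original order, which preserves A's stable tie order.
import Mathlib
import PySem

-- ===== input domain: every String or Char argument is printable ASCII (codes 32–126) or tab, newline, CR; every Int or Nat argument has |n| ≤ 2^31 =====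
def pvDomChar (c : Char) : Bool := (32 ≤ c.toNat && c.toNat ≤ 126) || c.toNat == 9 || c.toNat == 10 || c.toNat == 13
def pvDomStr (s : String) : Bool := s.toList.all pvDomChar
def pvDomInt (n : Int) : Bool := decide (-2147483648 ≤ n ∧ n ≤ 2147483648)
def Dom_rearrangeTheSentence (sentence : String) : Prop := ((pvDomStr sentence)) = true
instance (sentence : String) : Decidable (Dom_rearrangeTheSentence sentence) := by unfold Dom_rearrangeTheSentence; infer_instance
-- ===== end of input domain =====

-- B replaces A's comparison sort of (length, word) pairs by a counting/bucket pass over lengths 0..max; same return value on all inputs where A returns.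

-- ===== PORT A =====
def rearrangeTheSentence (sentence : String) : String :=
  let stripped := PySem.Str.stripChars sentence "."
  let words := PySem.Str.split₀ stripped
  let lengths := words.map PySem.Str.len
  let pairs := lengths.zip words
  let pairsSorted := PySem.List.sorted pairs (fun p => p.1) false
  let newSentence := pairsSorted.foldl (fun acc p => acc ++ [p.2]) ([] : List String)
  let joined := PySem.Str.lower (PySem.Str.join " " newSentence)
  match PySem.Str.pyGet? joined 0 with
  | none => ""   -- Python raises IndexError here; excluded by Pre_
  | some c => String.ofList (PySem.Chars.upperChar c :: (PySem.List.slice joined.toList (some 1) none ++ ['.']))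

-- ===== PORT B =====
def rearrangeTheSentence_alt (sentence : String) : String :=
  let words := PySem.Str.split₀ (PySem.Str.stripChars sentence ".")
  match PySem.List.max? (words.map PySem.Str.len) (fun x => x) with
  | none => ""   -- Python raises ValueError (max of empty) here; excluded by Pre_
  | some longest =>
    let ordered := (PySem.List.pyRange 0 (longest + 1) 1).foldl
      (fun acc length =>
        words.foldl (fun acc2 w => if PySem.Str.len w == length then acc2 ++ [w] else acc2) acc) []
    let s := PySem.Str.lower (PySem.Str.join " " ordered)
    match PySem.Str.pyGet? s 0 with
    | none => ""
    | some c => String.ofList (PySem.Chars.upperChar c :: (PySem.List.slice s.toList (some 1) none ++ ['.']))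

-- ===== PRECONDITION & SPEC =====
-- Pre_ excludes exactly the inputs with no word after stripping dots (empty/whitespace-only), where A raises IndexError.
def Pre_rearrangeTheSentence (sentence : String) : Prop :=
  PySem.Str.split₀ (PySem.Str.stripChars sentence ".") ≠ []
instance (sentence : String) : Decidable (Pre_rearrangeTheSentence sentence) := by
  unfold Pre_rearrangeTheSentence; infer_instance
def pvWitness_rearrangeTheSentence : String := "The lines are printed in reverse order."

def Spec_rearrangeTheSentence (sentence : String) (out : String) : Prop := out = rearrangeTheSentence_alt sentence
instance (sentence : String) (out : String) : Decidable (Spec_rearrangeTheSentence sentence out) := by unfold Spec_rearrangeTheSentence; infer_instance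

-- ===== CLAIM (what is proved, stated in full; the proofs are below) =====
def Claim_equal_rearrangeTheSentence : Prop := ∀ (sentence : String), Dom_rearrangeTheSentence sentence → Pre_rearrangeTheSentence sentence → Spec_rearrangeTheSentence sentence (rearrangeTheSentence sentence)

-- ===== LEMMAS AND PROOFS =====

theorem flatMap_congr_mem {α β : Type} (l : List α) (f g : α → List β)
    (h : ∀ a ∈ l, f a = g a) : l.flatMap f = l.flatMap g := by
  induction l with
  | nil => rfl
  | cons a l ih =>
    simp only [List.flatMap_cons, h a (by simp), ih (fun b hb => h b (by simp [hb]))]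

theorem insertBy_cons {α : Type} (before : α → α → Bool) (x y : α) (ys : List α) :
    PySem.List.insertBy before x (y :: ys) =
      if before x y then x :: y :: ys else y :: PySem.List.insertBy before x ys := by
  simp [PySem.List.insertBy]

theorem insertBy_append_left {α : Type} (before : α → α → Bool) (x : α) (P S : List α)
    (hP : ∀ a ∈ P, before x a = false) :
    PySem.List.insertBy before x (P ++ S) = P ++ PySem.List.insertBy before x S := by
  induction P with
  | nil => simp
  | cons a P ih =>
    have ha : before x a = false := hP a (by simp)
    simp only [List.cons_append, insertBy_cons, ha, Bool.false_eq_true, if_false]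
    rw [ih (fun b hb => hP b (by simp [hb]))]

theorem insertBy_all_before {α : Type} (before : α → α → Bool) (x : α) (S : List α)
    (hS : ∀ b ∈ S, before x b = true) :
    PySem.List.insertBy before x S = x :: S := by
  cases S with
  | nil => simp [PySem.List.insertBy]
  | cons b bs => rw [insertBy_cons, hS b (by simp), if_pos rfl]

-- stable sort by an Int key in [0, m] = concatenation of the length-buckets in increasing key order
theorem sorted_eq_buckets {α : Type} (key : α → Int) (m : Int) (ws : List α)
    (h : ∀ w ∈ ws, 0 ≤ key w ∧ key w ≤ m) :
    PySem.List.sorted ws key false =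
      (PySem.List.pyRange 0 (m + 1) 1).flatMap (fun L => ws.filter (fun w => key w == L)) := by
  induction ws using List.reverseRecOn with
  | nil => simp [PySem.List.sorted_eq_foldl_insertBy]
  | append_singleton ws x ih =>
    have hx := h x (by simp)
    have hws : ∀ w ∈ ws, 0 ≤ key w ∧ key w ≤ m := fun w hw => h w (by simp [hw])
    have hstep : PySem.List.sorted (ws ++ [x]) key false =
        PySem.List.insertBy (fun a b => decide (key a < key b)) x (PySem.List.sorted ws key false) := by
      rw [PySem.List.sorted_eq_foldl_insertBy, List.foldl_append, ← PySem.List.sorted_eq_foldl_insertBy]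
      rfl
    rw [hstep, ih hws]
    have hsplit1 : PySem.List.pyRange 0 (m + 1) 1 =
        PySem.List.pyRange 0 (key x + 1) 1 ++ PySem.List.pyRange (key x + 1) (m + 1) 1 :=
      PySem.List.pyRange_one_append 0 (key x + 1) (m + 1) (by omega) (by omega)
    have hsplit2 : PySem.List.pyRange 0 (key x + 1) 1 =
        PySem.List.pyRange 0 (key x) 1 ++ PySem.List.pyRange (key x) (key x + 1) 1 :=
      PySem.List.pyRange_one_append 0 (key x) (key x + 1) (by omega) (by omega)
    have hsingle : PySem.List.pyRange (key x) (key x + 1) 1 = [key x] := by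
      rw [PySem.List.pyRange_one]; simp
    -- left side: insert x after the buckets of keys ≤ key x
    rw [hsplit1, List.flatMap_append]
    rw [insertBy_append_left _ x _ _ (by
      intro a ha
      simp only [List.mem_flatMap, List.mem_filter, PySem.List.mem_pyRange_one] at ha
      obtain ⟨L, ⟨_, hL⟩, _, hk⟩ := ha
      simp only [beq_iff_eq] at hk
      simp only [decide_eq_false_iff_not, not_lt]
      omega)]
    rw [insertBy_all_before _ x _ (by
      intro b hb
      simp only [List.mem_flatMap, List.mem_filter, PySem.List.mem_pyRange_one] at hb
      obtain ⟨L, ⟨hL, _⟩, _, hk⟩ := hb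
      simp only [beq_iff_eq] at hk
      simp only [decide_eq_true_eq]
      omega)]
    -- right side: the buckets of ws ++ [x] — split the range at key x
    have hne : ∀ (a b : Int), (∀ L ∈ PySem.List.pyRange a b 1, L ≠ key x) →
        (PySem.List.pyRange a b 1).flatMap (fun L => (ws ++ [x]).filter (fun w => key w == L)) =
        (PySem.List.pyRange a b 1).flatMap (fun L => ws.filter (fun w => key w == L)) := by
      intro a b hab
      apply flatMap_congr_mem
      intro L hL
      have : ¬ (key x == L) = true := by simp [Ne.symm (hab L hL)]
      simp [List.filter_append, this]
    rw [List.flatMap_append]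
    rw [hne (key x + 1) (m + 1) (by intro L hL; rw [PySem.List.mem_pyRange_one] at hL; omega)]
    rw [hsplit2]
    simp only [List.flatMap_append]
    rw [hne 0 (key x) (by intro L hL; rw [PySem.List.mem_pyRange_one] at hL; omega)]
    rw [hsingle]
    have hat : ([key x] : List Int).flatMap (fun L => (ws ++ [x]).filter (fun w => key w == L)) =
        ws.filter (fun w => key w == key x) ++ [x] := by
      simp [List.filter_append, List.filter_cons]
    rw [hat]
    simp

theorem len_nonneg (w : String) : 0 ≤ PySem.Str.len w := by
  simp [PySem.Str.len]

theorem ordered_lists_eq (words : List String) (mx : Int)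
    (hmx : PySem.List.max? (words.map PySem.Str.len) (fun x => x) = some mx) :
    (PySem.List.sorted ((words.map PySem.Str.len).zip words) (fun p => p.1) false).foldl
        (fun acc p => acc ++ [p.2]) ([] : List String) =
      (PySem.List.pyRange 0 (mx + 1) 1).foldl
        (fun acc length =>
          words.foldl (fun acc2 w => if PySem.Str.len w == length then acc2 ++ [w] else acc2) acc) [] := by
  have hub : ∀ w ∈ words, PySem.Str.len w ≤ mx := by
    intro w hw
    exact PySem.List.max?_isMax hmx (PySem.Str.len w) (List.mem_map_of_mem hw)
  have hzip : (words.map PySem.Str.len).zip words = words.map (fun w => (PySem.Str.len w, w)) := by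
    calc (words.map PySem.Str.len).zip words
        = (words.map PySem.Str.len).zip (words.map id) := by rw [List.map_id]
      _ = words.map (fun w => (PySem.Str.len w, id w)) := by rw [List.zip_map']
      _ = words.map (fun w => (PySem.Str.len w, w)) := rfl
  -- A side: the fold is map snd, and the stable sort is the bucket concatenation
  rw [PySem.List.foldl_append_eq_flatMap, hzip]
  rw [sorted_eq_buckets (fun (p : Int × String) => p.1) mx (words.map (fun w => (PySem.Str.len w, w))) (by
    intro p hp
    simp only [List.mem_map] at hp
    obtain ⟨w, hw, rfl⟩ := hp
    exact ⟨len_nonneg w, hub w hw⟩)]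
  -- B side: the two folds are a flatMap of filters
  have hinner : (fun (acc : List String) (length : Int) =>
        words.foldl (fun acc2 w => if PySem.Str.len w == length then acc2 ++ [w] else acc2) acc) =
      (fun acc length => acc ++ words.filter (fun w => PySem.Str.len w == length)) := by
    funext acc length
    exact PySem.List.foldl_append_if_eq_filter _ _ _
  rw [hinner, PySem.List.foldl_append_eq_flatMap]
  have hmap : ∀ (l : List (Int × String)), l.flatMap (fun p => [p.2]) = l.map Prod.snd := by
    intro l; induction l with
    | nil => rfl
    | cons p l ih => simp [ih]
  simp only [List.nil_append]
  rw [hmap, List.map_flatMap]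
  apply flatMap_congr_mem
  intro L _
  simp [List.filter_map, Function.comp_def, List.map_map]

-- ===== VERDICT (by name: the statement is the Claim_ definition above) =====
theorem rearrangeTheSentence_spec : Claim_equal_rearrangeTheSentence := by
  unfold Claim_equal_rearrangeTheSentence
  intro sentence _ hpre
  unfold Spec_rearrangeTheSentence rearrangeTheSentence rearrangeTheSentence_alt
  unfold Pre_rearrangeTheSentence at hpre
  obtain ⟨mx, hmx⟩ : ∃ mx, PySem.List.max?
      ((PySem.Str.split₀ (PySem.Str.stripChars sentence ".")).map PySem.Str.len) (fun x => x) = some mx := by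
    cases hcase : PySem.List.max?
        ((PySem.Str.split₀ (PySem.Str.stripChars sentence ".")).map PySem.Str.len) (fun x => x) with
    | none =>
      rw [PySem.List.max?_eq_none_iff, List.map_eq_nil_iff] at hcase
      exact absurd hcase hpre
    | some m => exact ⟨m, rfl⟩
  simp only [hmx]
  rw [ordered_lists_eq _ mx hmx]
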